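-- pv_equiv track=rewrite | github.com/BSteiner1/RodSort | RodSort.py | RodSort
-- ===== SOURCE A (Python) =====
-- def insert_number(list, x):
--
--     index = len(list)
--     # Searching for the position
--     for i in range(len(list)):
--       if list[i] > x:
--         index = i
--         break
--
--     # Inserting n in the list
--     if index == len(list):
--       list = list[:index] + [x]
--     else:
--       list = list[:index] + [x] + list[index:]
--
--     return list, index
--
-- def insert_by_index(list, num, index, bin):
--
--     if list == []:
--         list.append(num)
--
--         return list, bin
--
--     if index >= len(list):
--         index = len(list)
--         if num >= list[-1]:
--             list.append(num)
--         else: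
--             bin.append(num)
--
--         return list, bin
--
--     else:
--         if num >= list[index-1] and num <= list[index]:
--             list.insert(index, num)
--         else:
--             bin.append(num)
--
--     return list, bin
--
-- def RodSort(lst):
--
--     first_half = []
--     second_half = []
--     recycle_bin = []
--     rod_length = int(len(lst)/2)
--
--     for i in range(rod_length):
--         rod = [lst[i], lst[i + rod_length]]
--
--         if rod[0] < rod[1]:
--             None
--
--         if lst[i] <= lst[i + rod_length]:
--             rod = [lst[i], lst[i + rod_length]]
--         else:
--             rod = [lst[i + rod_length], lst[i]]
--
--         index = insert_number(second_half, rod[1])[1]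
--         second_half = insert_number(second_half, rod[1])[0]
--
--         insert_by_index(first_half, rod[0], index, recycle_bin)
--
--
--     return first_half, second_half, recycle_bin
-- ===== SOURCE B (Python) =====
-- def RodSort(lst):
--     # One pass, no helper functions: binary search (bisect-right) into the
--     # sorted second_half instead of A's linear scan + slice rebuilds.
--     n = len(lst) // 2
--     first_half, second_half, recycle_bin = [], [], []
--     for a, b in zip(lst[:n], lst[n:2 * n]):
--         lo, hi = (a, b) if a <= b else (b, a)
--         i, j = 0, len(second_half)
--         while i < j:
--             m = (i + j) // 2
--             if second_half[m] > hi: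
--                 j = m
--             else:
--                 i = m + 1
--         second_half.insert(i, hi)
--         if not first_half:
--             first_half.append(lo)
--         elif i >= len(first_half):
--             if lo >= first_half[-1]:
--                 first_half.append(lo)
--             else:
--                 recycle_bin.append(lo)
--         elif first_half[i - 1] <= lo <= first_half[i]:
--             first_half.insert(i, lo)
--         else:
--             recycle_bin.append(lo)
--     return first_half, second_half, recycle_bin
-- ===== Notes on version B (the rewrite author's own statement) =====
-- stated objective: faster
-- what changed: Replaces A's helper-based linear scan (insert_number, called twice per element) with slice rebuilds by a single helper-free pass that binary-searches the sorted second_half and uses in-place list.insert.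
import Mathlib
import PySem

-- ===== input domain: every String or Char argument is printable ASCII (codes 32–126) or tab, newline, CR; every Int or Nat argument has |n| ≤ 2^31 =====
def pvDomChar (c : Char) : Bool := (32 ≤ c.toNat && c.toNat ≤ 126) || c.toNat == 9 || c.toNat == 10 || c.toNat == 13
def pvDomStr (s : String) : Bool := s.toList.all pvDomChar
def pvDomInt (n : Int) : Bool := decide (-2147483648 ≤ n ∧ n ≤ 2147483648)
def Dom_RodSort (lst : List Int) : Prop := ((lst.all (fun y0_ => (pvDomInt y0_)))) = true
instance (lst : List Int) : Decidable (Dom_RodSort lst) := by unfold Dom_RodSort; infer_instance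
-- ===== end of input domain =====

-- B replaces A's helper-based linear scan (insert_number, called twice) and slice
-- rebuilds by one helper-free pass with a hand-written binary search into the sorted
-- second_half and in-place inserts; A mutates nothing observable (first_half/recycle_bin
-- are locals), so return-value equivalence is the whole story.

-- ===== PORT A =====

-- the 'for i in range(len(list)): if list[i] > x: index = i; break' scan of insert_number
def pyScanIdx (l : List Int) (x : Int) : Option Nat :=
  match l with
  | [] => none
  | y :: t => if y > x then some 0 else (pyScanIdx t x).map (· + 1)

def insertNumber (l : List Int) (x : Int) : List Int × Nat :=
  let index := (pyScanIdx l x).getD l.length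
  if index = l.length then (l.take index ++ [x], index)   -- list[:index] + [x]
  else (l.take index ++ [x] ++ l.drop index, index)       -- list[:index] + [x] + list[index:]

def insertByIndex (fh : List Int) (num : Int) (index : Nat) (bin : List Int) :
    List Int × List Int :=
  if fh = [] then (fh ++ [num], bin)
  else if fh.length ≤ index then                          -- index >= len(list)
    if PySem.List.pyGetD fh (-1) 0 ≤ num then (fh ++ [num], bin)   -- num >= list[-1]
    else (fh, bin ++ [num])
  else
    if PySem.List.pyGetD fh ((index : Int) - 1) 0 ≤ num ∧
       num ≤ PySem.List.pyGetD fh (index : Int) 0 then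
      (PySem.List.insert fh (index : Int) num, bin)       -- list.insert(index, num)
    else (fh, bin ++ [num])

def stepA (st : List Int × List Int × List Int) (a b : Int) :
    List Int × List Int × List Int :=
  -- the first 'rod = [...]' and the no-op 'if rod[0] < rod[1]: None' have no effect
  let rod := if a ≤ b then (a, b) else (b, a)
  let index := (insertNumber st.2.1 rod.2).2
  let sh' := (insertNumber st.2.1 rod.2).1
  let fb := insertByIndex st.1 rod.1 index st.2.2
  (fb.1, sh', fb.2)

def RodSort (lst : List Int) : List Int × List Int × List Int :=
  let rodLength := lst.length / 2      -- int(len(lst)/2)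
  (PySem.List.pyRange 0 (rodLength : Int) 1).foldl
    (fun st i => stepA st (PySem.List.pyGetD lst i 0)
                          (PySem.List.pyGetD lst (i + (rodLength : Int)) 0))
    ([], [], [])

-- ===== PORT B =====

-- the hand-written bisect-right while loop of Source B
def bsr (s : List Int) (x : Int) (i j : Nat) : Nat :=
  if h : i < j then
    let m := (i + j) / 2
    if x < s.getD m 0 then bsr s x i m else bsr s x (m + 1) j
  else i
termination_by j - i
decreasing_by all_goals omega

def stepB (st : List Int × List Int × List Int) (p : Int × Int) :
    List Int × List Int × List Int :=
  let lohi := if p.1 ≤ p.2 then (p.1, p.2) else (p.2, p.1)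
  let lo := lohi.1; let hi := lohi.2
  let i := bsr st.2.1 hi 0 st.2.1.length
  let sh' := st.2.1.take i ++ hi :: st.2.1.drop i          -- second_half.insert(i, hi)
  if st.1 = [] then (st.1 ++ [lo], sh', st.2.2)
  else if st.1.length ≤ i then
    if (st.1.getLast?).getD 0 ≤ lo then (st.1 ++ [lo], sh', st.2.2)
    else (st.1, sh', st.2.2 ++ [lo])
  else if PySem.List.pyGetD st.1 ((i : Int) - 1) 0 ≤ lo ∧
          lo ≤ PySem.List.pyGetD st.1 (i : Int) 0 then
    (st.1.take i ++ lo :: st.1.drop i, sh', st.2.2)        -- first_half.insert(i, lo)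
  else (st.1, sh', st.2.2 ++ [lo])

def RodSort_alt (lst : List Int) : List Int × List Int × List Int :=
  let n := lst.length / 2
  (((lst.take n).zip ((lst.drop n).take n)).foldl stepB ([], [], []))  -- zip(lst[:n], lst[n:2n])

-- ===== PRECONDITION & SPEC =====
def Spec_RodSort (lst : List Int) (out : List Int × List Int × List Int) : Prop := out = RodSort_alt lst
instance (lst : List Int) (out : List Int × List Int × List Int) : Decidable (Spec_RodSort lst out) := by unfold Spec_RodSort; infer_instance

-- ===== CLAIM (what is proved, stated in full; the proofs are below) =====
def Claim_equal_RodSort : Prop := ∀ (lst : List Int), Dom_RodSort lst → Spec_RodSort lst (RodSort lst)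


-- ===== LEMMAS AND PROOFS =====

-- getD-monotonicity of a nondecreasing list
theorem pairwise_getD_mono (s : List Int) (hs : s.Pairwise (· ≤ ·))
    (p q : Nat) (hpq : p ≤ q) (hq : q < s.length) : s.getD p 0 ≤ s.getD q 0 := by
  rcases lt_or_eq_of_le hpq with h | h
  · rw [List.getD_eq_getElem s 0 (by omega), List.getD_eq_getElem s 0 hq]
    exact (List.pairwise_iff_getElem.1 hs) p q (by omega) hq h
  · subst h; exact le_refl _

-- characterisation of A's linear scan index
theorem scan_spec (s : List Int) (x : Int) :
    (pyScanIdx s x).getD s.length ≤ s.length ∧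
    (∀ k, k < (pyScanIdx s x).getD s.length → s.getD k 0 ≤ x) ∧
    ((pyScanIdx s x).getD s.length < s.length →
      x < s.getD ((pyScanIdx s x).getD s.length) 0) := by
  induction s with
  | nil => simp [pyScanIdx]
  | cons y t ih =>
    have hux : pyScanIdx (y :: t) x
        = if x < y then some 0 else (pyScanIdx t x).map (· + 1) := rfl
    by_cases hy : x < y
    · rw [hux, if_pos hy]
      refine ⟨by simp, by simp, fun _ => ?_⟩
      simpa using hy
    · rw [hux, if_neg hy]
      have hyx : y ≤ x := by omega
      rcases ht : pyScanIdx t x with _ | r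
      · rw [ht] at ih
        simp only [ht, Option.map_none, Option.getD_none, List.length_cons] at *
        refine ⟨le_refl _, ?_, by omega⟩
        intro k hk
        match k with
        | 0 => simpa using hyx
        | Nat.succ k' =>
          rw [List.getD_cons_succ]
          exact ih.2.1 k' (by omega)
      · rw [ht] at ih
        simp only [ht, Option.map_some, Option.getD_some, List.length_cons] at *
        refine ⟨by omega, ?_, ?_⟩
        · intro k hk
          match k with
          | 0 => simpa using hyx
          | Nat.succ k' =>
            rw [List.getD_cons_succ]
            exact ih.2.1 k' (by omega)
        · intro h
          rw [List.getD_cons_succ]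
          exact ih.2.2 (by omega)

-- characterisation of B's binary search
theorem bsr_spec (s : List Int) (x : Int)
    (hmono : ∀ p q, p ≤ q → q < s.length → s.getD p 0 ≤ s.getD q 0) :
    ∀ n i j, j - i = n → i ≤ j → j ≤ s.length →
    (∀ k, k < i → s.getD k 0 ≤ x) →
    (∀ k, j ≤ k → k < s.length → x < s.getD k 0) →
    bsr s x i j ≤ s.length ∧
    (∀ k, k < bsr s x i j → s.getD k 0 ≤ x) ∧
    (bsr s x i j < s.length → x < s.getD (bsr s x i j) 0) := by
  intro n
  induction n using Nat.strong_induction_on with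
  | _ n IH =>
    intro i j hn hij hjl hlo hhi
    by_cases h : i < j
    · rw [bsr, dif_pos h]
      set m := (i + j) / 2 with hm
      by_cases hx : x < s.getD m 0
      · rw [if_pos hx]
        refine IH (m - i) (by omega) i m (by omega) (by omega) (by omega) hlo ?_
        intro k hk hkl
        calc x < s.getD m 0 := hx
          _ ≤ s.getD k 0 := hmono m k hk hkl
      · rw [if_neg hx]
        push_neg at hx
        refine IH (j - (m + 1)) (by omega) (m + 1) j (by omega) (by omega) hjl ?_ hhi
        intro k hk
        calc s.getD k 0 ≤ s.getD m 0 := hmono k m (by omega) (by omega)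
          _ ≤ x := hx
    · rw [bsr, dif_neg h]
      have : i = j := by omega
      subst this
      exact ⟨hjl, fun k hk => hlo k hk, fun h' => hhi i (le_refl _) h'⟩

-- the two index computations agree on a sorted list
theorem scan_eq_bsr (s : List Int) (x : Int) (hs : s.Pairwise (· ≤ ·)) :
    (pyScanIdx s x).getD s.length = bsr s x 0 s.length := by
  obtain ⟨h1, h2, h3⟩ := scan_spec s x
  obtain ⟨h1', h2', h3'⟩ := bsr_spec s x (pairwise_getD_mono s hs) s.length 0 s.length
    rfl (by omega) (le_refl _) (by omega) (by omega)
  set r1 := (pyScanIdx s x).getD s.length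
  set r2 := bsr s x 0 s.length
  rcases lt_trichotomy r1 r2 with h | h | h
  · exact absurd (h2' r1 h) (by have := h3 (by omega); omega)
  · exact h
  · exact absurd (h2 r2 h) (by have := h3' (by omega); omega)

-- A's slice-built insertion is take/cons/drop at the scan index
theorem insertNumber_fst (s : List Int) (x : Int) :
    (insertNumber s x).1 =
      s.take ((pyScanIdx s x).getD s.length) ++ x :: s.drop ((pyScanIdx s x).getD s.length) := by
  unfold insertNumber
  set r := (pyScanIdx s x).getD s.length with hr
  by_cases h : r = s.length
  · simp [h]
  · simp [h]

theorem insertNumber_snd (s : List Int) (x : Int) :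
    (insertNumber s x).2 = (pyScanIdx s x).getD s.length := by
  unfold insertNumber
  set r := (pyScanIdx s x).getD s.length with hr
  by_cases h : r = s.length
  · simp [h]
  · simp [h]

-- inserting at the scan index keeps the list nondecreasing
theorem insert_sorted (s : List Int) (x : Int) (r : Nat) (hr : r ≤ s.length)
    (hlb : ∀ k, k < r → s.getD k 0 ≤ x)
    (hub : ∀ k, r ≤ k → k < s.length → x < s.getD k 0)
    (hs : s.Pairwise (· ≤ ·)) :
    (s.take r ++ x :: s.drop r).Pairwise (· ≤ ·) := by
  rw [List.pairwise_append]
  refine ⟨hs.sublist (List.take_sublist r s), ?_, ?_⟩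
  · rw [List.pairwise_cons]
    refine ⟨?_, hs.sublist (List.drop_sublist r s)⟩
    intro y hy
    obtain ⟨k, hk, hky⟩ := List.mem_iff_getElem.1 hy
    rw [List.getElem_drop] at hky
    have := hub (r + k) (by omega) (by rw [List.length_drop] at hk; omega)
    rw [List.getD_eq_getElem s 0 (by rw [List.length_drop] at hk; omega)] at this
    omega
  · intro a ha b hb
    obtain ⟨k, hk, hka⟩ := List.mem_iff_getElem.1 ha
    rw [List.getElem_take] at hka
    have hk' : k < r := by rw [List.length_take] at hk; omega
    have hax : a ≤ x := by
      have := hlb k hk'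
      rw [List.getD_eq_getElem s 0 (by omega)] at this; omega
    rcases List.mem_cons.1 hb with rfl | hb'
    · exact hax
    · obtain ⟨j, hj, hjb⟩ := List.mem_iff_getElem.1 hb'
      rw [List.getElem_drop] at hjb
      have := hub (r + j) (by omega) (by rw [List.length_drop] at hj; omega)
      rw [List.getD_eq_getElem s 0 (by rw [List.length_drop] at hj; omega)] at this
      omega

-- one loop step of A equals one loop step of B, and second_half stays sorted
theorem step_eq (st : List Int × List Int × List Int) (a b : Int)
    (hs : st.2.1.Pairwise (· ≤ ·)) :
    stepA st a b = stepB st (a, b) ∧ (stepA st a b).2.1.Pairwise (· ≤ ·) := by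
  obtain ⟨fh, sh, bin⟩ := st
  simp only at hs
  set hi := if a ≤ b then b else a with hhi
  set lo := if a ≤ b then a else b with hlo
  have hrod : (if a ≤ b then (a, b) else (b, a)) = (lo, hi) := by
    by_cases h : a ≤ b <;> simp [h, hhi, hlo]
  obtain ⟨h1, h2, h3⟩ := scan_spec sh hi
  set r := (pyScanIdx sh hi).getD sh.length with hr
  have hub : ∀ k, r ≤ k → k < sh.length → hi < sh.getD k 0 := by
    intro k hk hkl
    calc hi < sh.getD r 0 := h3 (by omega)
      _ ≤ sh.getD k 0 := pairwise_getD_mono sh hs r k hk hkl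
  have hidx : bsr sh hi 0 sh.length = r := (scan_eq_bsr sh hi hs).symm
  have hsorted' : (sh.take r ++ hi :: sh.drop r).Pairwise (· ≤ ·) :=
    insert_sorted sh hi r h1 h2 hub hs
  have hAeq : stepA (fh, sh, bin) a b =
      ((insertByIndex fh lo r bin).1, sh.take r ++ hi :: sh.drop r,
       (insertByIndex fh lo r bin).2) := by
    simp only [stepA, hrod]
    rw [insertNumber_fst, insertNumber_snd, ← hr]
  refine ⟨?_, by rw [hAeq]; exact hsorted'⟩
  rw [hAeq]
  simp only [stepB, hrod, hidx]
  unfold insertByIndex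
  by_cases hfhe : fh = []
  · simp [hfhe]
  · rw [if_neg hfhe, if_neg hfhe]
    by_cases hlen : fh.length ≤ r
    · rw [if_pos hlen, if_pos hlen,
        PySem.List.pyGetD_neg_one fh 0 hfhe, List.getLast?_eq_getLast hfhe]
      simp only [Option.getD_some]
      by_cases hc : fh.getLast hfhe ≤ lo
      · rw [if_pos hc, if_pos hc]
      · rw [if_neg hc, if_neg hc]
    · rw [if_neg hlen, if_neg hlen]
      have hlen' : r < fh.length := by omega
      by_cases hc : PySem.List.pyGetD fh ((r : Int) - 1) 0 ≤ lo ∧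
          lo ≤ PySem.List.pyGetD fh (r : Int) 0
      · rw [if_pos hc, if_pos hc, PySem.List.insert_natCast fh r lo (by omega)]
      · rw [if_neg hc, if_neg hc]

-- fold two step functions that agree under a preserved invariant
theorem foldl_eq_of_inv {σ α : Type} (Inv : σ → Prop) (f : σ → α → σ) (g : σ → α → σ)
    (h : ∀ s a, Inv s → f s a = g s a ∧ Inv (f s a)) :
    ∀ (l : List α) (s : σ), Inv s → List.foldl f s l = List.foldl g s l := by
  intro l
  induction l with
  | nil => intro s _; rfl
  | cons x t ih =>
    intro s hsinv
    obtain ⟨heq, hinv⟩ := h s x hsinv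
    simp only [List.foldl_cons, heq]
    rw [← heq]
    exact ih (f s x) hinv

-- B's zipped pair list, elementwise
theorem zip_eq_map_range (lst : List Int) :
    (lst.take (lst.length / 2)).zip ((lst.drop (lst.length / 2)).take (lst.length / 2)) =
      (List.range (lst.length / 2)).map
        (fun k => (lst.getD k 0, lst.getD (k + lst.length / 2) 0)) := by
  set n := lst.length / 2 with hn
  have h2n : n + n ≤ lst.length := by omega
  apply List.ext_getElem
  · simp; omega
  · intro k hk1 hk2
    have hkn : k < n := by simpa using hk2
    simp only [List.getElem_zip, List.getElem_map, List.getElem_range,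
      List.getElem_take, List.getElem_drop, Prod.mk.injEq]
    rw [List.getD_eq_getElem lst 0 (by omega), List.getD_eq_getElem lst 0 (by omega)]
    constructor <;> congr 1 <;> omega

-- ===== VERDICT (by name: the statement is the Claim_ definition above) =====
theorem RodSort_spec : Claim_equal_RodSort := by
  intro lst _
  show RodSort lst = RodSort_alt lst
  dsimp only [RodSort, RodSort_alt]
  set n := lst.length / 2 with hn
  rw [zip_eq_map_range lst, ← hn, List.foldl_map]
  have hrange : PySem.List.pyRange 0 (n : Int) 1 = List.map (fun k : Nat => (k : Int)) (List.range n) := by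
    rw [PySem.List.pyRange_one]
    have h1 : ((n : Int) - 0).toNat = n := by omega
    rw [h1]
    simp only [zero_add]
  rw [hrange, List.foldl_map]
  have hbody : (fun (st : List Int × List Int × List Int) (k : Nat) =>
        stepA st (PySem.List.pyGetD lst (k : Int) 0)
          (PySem.List.pyGetD lst ((k : Int) + (n : Int)) 0))
      = (fun st k => stepA st (lst.getD k 0) (lst.getD (k + n) 0)) := by
    funext st k
    rw [show ((k : Int) + (n : Int)) = ((k + n : Nat) : Int) by push_cast; ring]
    rw [PySem.List.pyGetD_natCast, PySem.List.pyGetD_natCast]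
  rw [hbody]
  exact foldl_eq_of_inv (fun st => st.2.1.Pairwise (· ≤ ·)) _ _
    (fun st k hinv => step_eq st (lst.getD k 0) (lst.getD (k + n) 0) hinv)
    (List.range n) ([], [], []) List.Pairwise.nil
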